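-- pv_equiv track=rewrite | github.com/conda-incubator/conda-pypi | conda_pypi/build.py | _parse_vcs_url
-- ===== SOURCE A (Python) =====
-- def _parse_vcs_url(vcs_url: str) -> tuple[str, str, str | None]:
--     """
--     Parse a VCS URL to extract the VCS type, repository URL, and revision.
--
--     Args:
--         vcs_url: VCS URL like 'git+https://github.com/user/repo.git@tag#egg=name'
--
--     Returns:
--         Tuple of (vcs_type, repo_url, revision). revision is None if not specified.
--
--     Raises:
--         ValueError: If the VCS URL format is not supported
--
--     Examples:
--         >>> _parse_vcs_url("git+https://github.com/user/repo.git@v1.0#egg=pkg")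
--         ('git', 'https://github.com/user/repo.git', 'v1.0')
--         >>> _parse_vcs_url("git+https://github.com/user/repo.git")
--         ('git', 'https://github.com/user/repo.git', None)
--     """
--     # Remove the egg fragment if present
--     if "#egg=" in vcs_url:
--         vcs_url = vcs_url.split("#egg=")[0]
--
--     # Map VCS prefixes to types and their lengths
--     vcs_mapping = {
--         "git+": ("git", 4),
--         "hg+": ("hg", 3),
--         "svn+": ("svn", 4),
--         "bzr+": ("bzr", 4),
--     }
--
--     # Find matching VCS type
--     vcs_type = None
--     repo_part = None
--     for prefix, (vcs_name, prefix_len) in vcs_mapping.items():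
--         if vcs_url.startswith(prefix):
--             vcs_type = vcs_name
--             repo_part = vcs_url[prefix_len:]
--             break
--
--     if vcs_type is None:
--         raise ValueError(f"Unsupported VCS URL format: {vcs_url}")
--
--     # Extract revision if present (after @)
--     if "@" in repo_part:
--         repo_url, revision = repo_part.rsplit("@", 1)
--     else:
--         repo_url = repo_part
--         revision = None
--
--     return vcs_type, repo_url, revision
-- ===== SOURCE B (Python) =====
-- def _parse_vcs_url(vcs_url: str) -> tuple[str, str, str | None]:
--     """Parse a VCS URL into (vcs_type, repo_url, revision) via partition instead of a prefix loop."""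
--     if "#egg=" in vcs_url:
--         vcs_url = vcs_url.split("#egg=")[0]
--     vcs_type, sep, rest = vcs_url.partition("+")
--     if sep != "+" or vcs_type not in {"git", "hg", "svn", "bzr"}:
--         raise ValueError(f"Unsupported VCS URL format: {vcs_url}")
--     repo_url, at, revision = rest.rpartition("@")
--     if at:
--         return vcs_type, repo_url, revision
--     return vcs_type, rest, None
-- ===== Notes on version B (the rewrite author's own statement) =====
-- stated objective: simpler
-- what changed: Replaces the first-match loop over the vcs_mapping dict (prefix + stored length bookkeeping) with a single str.partition on the first '+', a set-membership check of the vcs type, and str.rpartition('@') for the revision.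
import Mathlib
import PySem

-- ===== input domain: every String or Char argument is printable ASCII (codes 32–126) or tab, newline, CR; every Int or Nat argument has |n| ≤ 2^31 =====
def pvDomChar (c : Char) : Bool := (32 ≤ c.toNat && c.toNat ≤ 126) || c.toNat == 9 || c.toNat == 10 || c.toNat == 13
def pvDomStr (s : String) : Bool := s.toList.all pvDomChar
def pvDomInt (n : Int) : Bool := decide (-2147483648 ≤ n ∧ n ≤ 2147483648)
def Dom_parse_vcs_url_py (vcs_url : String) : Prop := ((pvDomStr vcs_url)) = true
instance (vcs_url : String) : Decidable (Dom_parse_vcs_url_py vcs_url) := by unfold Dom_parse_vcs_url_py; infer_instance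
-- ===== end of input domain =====

-- B replaces A's prefix-matching loop over the vcs_mapping dict by a single partition on the
-- first '+' plus a set-membership check (objective: simpler decomposition; same outputs wherever A returns).


-- shared first two Python lines of A and B:
--   if "#egg=" in vcs_url: vcs_url = vcs_url.split("#egg=")[0]
def pvStripEgg (cs : List Char) : List Char :=
  if PySem.Chars.isIn "#egg=".toList cs then
    ((PySem.Chars.split? cs "#egg=".toList).getD []).headD []
  else cs

-- ===== PORT A =====
-- the for-loop over vcs_mapping.items() with break, as a fold carrying the break state
def parse_vcs_url_py (vcs_url : String) : String × String × Option String :=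
  let cs := pvStripEgg vcs_url.toList
  let found :=
    ([("git+".toList, ("git", (4 : Nat))), ("hg+".toList, ("hg", 3)),
      ("svn+".toList, ("svn", 4)), ("bzr+".toList, ("bzr", 4))]).foldl
      (fun acc pr =>
        match acc with
        | some r => some r
        | none =>
          if PySem.Chars.startswith cs pr.1 then
            some (pr.2.1, PySem.List.slice cs (some (pr.2.2 : Int)) none)  -- vcs_url[prefix_len:]
          else none)
      none
  match found with
  | none => ("", "", none)  -- Python raises ValueError here; excluded by Pre_
  | some (vcs_name, repo_part) =>
    if PySem.Chars.isIn ['@'] repo_part then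
      -- repo_part.rsplit("@", 1) splits at the LAST '@' (exact: rfind gives its index)
      let i := (PySem.Chars.rfind repo_part ['@']).toNat
      (vcs_name, String.ofList (repo_part.take i), some (String.ofList (repo_part.drop (i + 1))))
    else (vcs_name, String.ofList repo_part, none)

-- ===== PORT B =====
def parse_vcs_url_py_alt (vcs_url : String) : String × String × Option String :=
  let cs := pvStripEgg vcs_url.toList
  -- vcs_type, sep, rest = url.partition("+")  (exact: find gives the index of the first '+', -1 if absent)
  let i := PySem.Chars.find cs ['+']
  let vtype := if i = -1 then cs else cs.take i.toNat
  let sep : List Char := if i = -1 then [] else ['+']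
  let rest := if i = -1 then [] else cs.drop (i.toNat + 1)
  if sep == ['+'] && ["git".toList, "hg".toList, "svn".toList, "bzr".toList].contains vtype then
    -- repo_url, at, revision = rest.rpartition("@")  (exact: rfind gives the index of the last '@', -1 if absent)
    let j := PySem.Chars.rfind rest ['@']
    if j = -1 then (String.ofList vtype, String.ofList rest, none)
    else (String.ofList vtype, String.ofList (rest.take j.toNat),
          some (String.ofList (rest.drop (j.toNat + 1))))
  else ("", "", none)  -- Python raises ValueError here; excluded by Pre_

-- ===== PRECONDITION & SPEC =====
-- Pre_ excludes exactly the inputs on which A raises ValueError ("Unsupported VCS URL format"):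
-- after stripping the "#egg=" fragment the URL must start with one of the four supported prefixes.
def Pre_parse_vcs_url_py (vcs_url : String) : Prop :=
  PySem.Chars.startswith (pvStripEgg vcs_url.toList) "git+".toList = true ∨
  PySem.Chars.startswith (pvStripEgg vcs_url.toList) "hg+".toList = true ∨
  PySem.Chars.startswith (pvStripEgg vcs_url.toList) "svn+".toList = true ∨
  PySem.Chars.startswith (pvStripEgg vcs_url.toList) "bzr+".toList = true
instance (vcs_url : String) : Decidable (Pre_parse_vcs_url_py vcs_url) := by
  unfold Pre_parse_vcs_url_py; infer_instance
def pvWitness_parse_vcs_url_py : String := "git+https://github.com/u/r.git@v1.0#egg=pkg"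
def Spec_parse_vcs_url_py (vcs_url : String) (out : String × String × Option String) : Prop := out = parse_vcs_url_py_alt vcs_url
instance (vcs_url : String) (out : String × String × Option String) : Decidable (Spec_parse_vcs_url_py vcs_url out) := by unfold Spec_parse_vcs_url_py; infer_instance

-- ===== CLAIM (what is proved, stated in full; the proofs are below) =====
def Claim_equal_parse_vcs_url_py : Prop := ∀ (vcs_url : String), Dom_parse_vcs_url_py vcs_url → Pre_parse_vcs_url_py vcs_url → Spec_parse_vcs_url_py vcs_url (parse_vcs_url_py vcs_url)

-- ===== LEMMAS AND PROOFS =====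

-- rfind's backward scan returns -1 iff the pattern is a prefix at no position ≤ n
lemma rfind_go_eq_neg_one_iff (s sub : List Char) (n : Nat) :
    PySem.Chars.rfind.go s sub n = -1 ↔ ∀ j ≤ n, ¬ sub <+: s.drop j := by
  induction n with
  | zero => simp [PySem.Chars.rfind.go, List.isPrefixOf_iff_prefix]
  | succ m ih =>
    rw [show PySem.Chars.rfind.go s sub (m+1) =
        (if sub.isPrefixOf (s.drop (m+1)) then ((m:Int)+1) else PySem.Chars.rfind.go s sub m) from rfl]
    split_ifs with h
    · simp only [List.isPrefixOf_iff_prefix] at h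
      constructor
      · intro hc; omega
      · intro hall; exact absurd h (hall (m+1) le_rfl)
    · rw [ih]
      simp only [List.isPrefixOf_iff_prefix] at h
      constructor
      · intro hall j hj
        rcases Nat.lt_or_ge j (m+1) with hlt | hge
        · exact hall j (by omega)
        · have : j = m+1 := by omega
          subst this; exact h
      · intro hall j hj; exact hall j (by omega)

-- A's guard '"@" in repo_part' (find-based) agrees with B's 'rfind == -1' check
lemma isIn_at_false_iff_rfind (t : List Char) :
    PySem.Chars.isIn ['@'] t = false ↔ PySem.Chars.rfind t ['@'] = -1 := by
  rw [PySem.Chars.isIn_eq_false_iff,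
      show PySem.Chars.rfind t ['@'] = PySem.Chars.rfind.go t ['@'] t.length from rfl,
      rfind_go_eq_neg_one_iff]
  constructor
  · intro h j _ hp
    exact h (hp.isInfix.trans (List.drop_suffix j t).isInfix)
  · intro h hinf
    obtain ⟨j, hp⟩ := (PySem.Chars.exists_prefix_drop_iff_isIn ['@'] t).2
      ((PySem.Chars.isIn_iff_infix ['@'] t).2 hinf)
    by_cases hj : j ≤ t.length
    · exact h j hj hp
    · rw [List.drop_eq_nil_of_le (by omega)] at hp
      simp at hp

-- A's revision branch (guarded by 'in') equals B's (guarded by rfind = -1)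
lemma tail_eq (name : String) (t : List Char) :
    (if PySem.Chars.isIn ['@'] t then
       (name, String.ofList (t.take (PySem.Chars.rfind t ['@']).toNat),
        some (String.ofList (t.drop ((PySem.Chars.rfind t ['@']).toNat + 1))))
     else (name, String.ofList t, none))
    = (if PySem.Chars.rfind t ['@'] = -1 then (name, String.ofList t, none)
       else (name, String.ofList (t.take (PySem.Chars.rfind t ['@']).toNat),
        some (String.ofList (t.drop ((PySem.Chars.rfind t ['@']).toNat + 1))))) := by
  by_cases h : PySem.Chars.isIn ['@'] t
  · have : ¬ PySem.Chars.rfind t ['@'] = -1 := by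
      intro he; rw [← isIn_at_false_iff_rfind] at he; rw [h] at he; cases he
    simp [h, this]
  · have h' := isIn_at_false_iff_rfind t |>.1 (by simpa using h)
    simp [h, h']

-- ===== VERDICT (by name: the statement is the Claim_ definition above) =====
theorem parse_vcs_url_py_spec : Claim_equal_parse_vcs_url_py := by
  intro v _ pre
  unfold Spec_parse_vcs_url_py
  rcases pre with h | h | h | h <;>
    (obtain ⟨t, ht⟩ := (PySem.Chars.startswith_iff _ _).1 h
     simp only [parse_vcs_url_py, parse_vcs_url_py_alt, ← ht]
     simp [PySem.Chars.startswith, List.isPrefixOf, PySem.Chars.find, PySem.Chars.find.go,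
           PySem.List.slice_from_natCast, String.ofList]
     simpa using tail_eq _ t)
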